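-- pv_equiv track=rewrite | github.com/AriaKillebrewBruehl/Advent-of-Code | day6/day06.2.py | getTotalChildren
-- ===== SOURCE A (Python) =====
-- def getTotalChildren(fish):
--     currentDay = fish[0]
--     spawnDays = fish[1] - currentDay
--     children = [[8, spawnDays - 1] for i in range(spawnDays // 7)]
--     total = 0
--     for child in children:
--         total += 1
--         childCurrentDay = child[0]
--         childSpawnDays = child[0] - childCurrentDay
--         if childSpawnDays // 7 >= 1:
--             for i in range(childSpawnDays):
--                 total += getTotalChildren([8, childSpawnDays])
--     return total
-- ===== SOURCE B (Python) =====
-- def getTotalChildren(fish):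
--     spawnDays = fish[1] - fish[0]
--     return max(0, spawnDays // 7)
-- ===== Notes on version B (the rewrite author's own statement) =====
-- stated objective: simpler
-- what changed: The nested loop and recursion are dead code (each child's spawn window is child[0]-child[0]=0), so B replaces the list-building and loop with the closed form max(0, (fish[1]-fish[0])//7).
import Mathlib
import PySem

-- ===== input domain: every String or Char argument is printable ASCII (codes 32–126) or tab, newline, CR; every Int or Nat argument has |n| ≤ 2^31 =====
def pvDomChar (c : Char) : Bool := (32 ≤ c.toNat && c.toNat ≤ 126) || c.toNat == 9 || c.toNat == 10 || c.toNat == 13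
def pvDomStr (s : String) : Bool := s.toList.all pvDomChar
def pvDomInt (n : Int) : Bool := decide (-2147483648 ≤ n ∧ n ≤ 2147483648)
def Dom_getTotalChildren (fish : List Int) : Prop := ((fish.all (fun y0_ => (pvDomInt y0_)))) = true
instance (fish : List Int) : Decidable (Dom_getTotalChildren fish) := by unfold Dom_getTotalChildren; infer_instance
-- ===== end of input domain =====

-- B replaces A's dead recursion and child-list loop with the closed form max(0, (fish[1]-fish[0])//7) (simpler).


-- ===== PORT A =====
-- Literal port of A. The inner `if childSpawnDays // 7 >= 1` branch is kept, but since
-- childSpawnDays = child.1 - child.1 = 0 the guard is provably false, so the dead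
-- recursive call is replaced by False.elim on a proof the branch is unreachable.
def getTotalChildren (fish : List Int) : Int :=
  let currentDay := (PySem.List.pyGet? fish 0).getD 0
  let spawnDays := (PySem.List.pyGet? fish 1).getD 0 - currentDay
  let children := (PySem.List.pyRange 0 (PySem.Int.floordiv spawnDays 7) 1).map
    (fun _ => ((8 : Int), spawnDays - 1))
  children.foldl (fun total child =>
    let total := total + 1
    let childCurrentDay := child.1
    if h : PySem.Int.floordiv (child.1 - childCurrentDay) 7 ≥ 1 then
      False.elim (by simp [childCurrentDay, sub_self] at h)
    else total) 0

-- ===== PORT B =====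
def getTotalChildren_alt (fish : List Int) : Int :=
  let spawnDays := (PySem.List.pyGet? fish 1).getD 0 - (PySem.List.pyGet? fish 0).getD 0
  max 0 (PySem.Int.floordiv spawnDays 7)

-- ===== PRECONDITION & SPEC =====
-- Pre_ excludes lists with fewer than two elements, on which A raises IndexError (B does too).
def Pre_getTotalChildren (fish : List Int) : Prop := 2 ≤ fish.length
instance (fish : List Int) : Decidable (Pre_getTotalChildren fish) := by unfold Pre_getTotalChildren; infer_instance
def pvWitness_getTotalChildren : List Int := [3, 25]

def Spec_getTotalChildren (fish : List Int) (out : Int) : Prop := out = getTotalChildren_alt fish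
instance (fish : List Int) (out : Int) : Decidable (Spec_getTotalChildren fish out) := by unfold Spec_getTotalChildren; infer_instance

-- ===== CLAIM (what is proved, stated in full; the proofs are below) =====
def Claim_equal_getTotalChildren : Prop := ∀ (fish : List Int), Dom_getTotalChildren fish → Pre_getTotalChildren fish → Spec_getTotalChildren fish (getTotalChildren fish)

-- ===== LEMMAS AND PROOFS =====

-- counting fold over any list just adds its length
theorem pv_foldl_count (l : List ((Int × Int))) (c : Int) :
    l.foldl (fun total child =>
      let total := total + 1
      let childCurrentDay := child.1
      if h : PySem.Int.floordiv (child.1 - childCurrentDay) 7 ≥ 1 then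
        False.elim (by simp [childCurrentDay, sub_self] at h)
      else total) c = c + l.length := by
  induction l generalizing c with
  | nil => simp
  | cons x xs ih =>
      simp only [List.foldl_cons, List.length_cons, ih]
      split
      · exact False.elim (by rename_i h; simp [sub_self] at h)
      · push_cast; ring

-- ===== VERDICT (by name: the statement is the Claim_ definition above) =====
theorem getTotalChildren_spec : Claim_equal_getTotalChildren := by
  intro fish _ _
  unfold Spec_getTotalChildren getTotalChildren getTotalChildren_alt
  simp only [pv_foldl_count, List.length_map, PySem.List.length_pyRange_one]
  omega
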